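-- pv_equiv track=rewrite | github.com/Pi-errot/lezioni_universita | informatica/codice/test_2025_07_08/06.py | calcolo
-- ===== SOURCE A (Python) =====
-- def calcolo(numeri):
--     coppie = []
--     for i in range(len(numeri)):
--         for j in range(i+1, len(numeri)):
--             num = numeri[i]
--             num2= numeri[j]
--             if num == num2:
--                 continue
--             if (num*num2)%2:
--                 continue
--             maggiore = max(num, num2)
--             minore = min(num, num2)
--             if (maggiore - minore) < 4:
--                 continue
--             tempRisultato = (maggiore, minore)
--             coppie.append(tempRisultato)
--     return len(coppie)
-- ===== SOURCE B (Python) =====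
-- def calcolo(numeri):
--     # Sort once; count pairs with difference >= 4 by a two-pointer sweep,
--     # then subtract the odd-odd pairs (the only ones with an odd product).
--     def coppie_dist4(s):
--         totale = 0
--         i = 0
--         for v in s:
--             while i < len(s) and s[i] <= v - 4:
--                 i += 1
--             totale += i
--         return totale
--     s = sorted(numeri)
--     dispari = [v for v in s if v % 2]
--     return coppie_dist4(s) - coppie_dist4(dispari)
-- ===== Notes on version B (the rewrite author's own statement) =====
-- stated objective: faster
-- what changed: Replaces A's O(n^2) double loop over index pairs by sorting the values once and counting pairs with difference >= 4 via a linear two-pointer sweep, then subtracting the same count over the odd values only (a pair's product is odd exactly when both values are odd).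
import Mathlib
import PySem

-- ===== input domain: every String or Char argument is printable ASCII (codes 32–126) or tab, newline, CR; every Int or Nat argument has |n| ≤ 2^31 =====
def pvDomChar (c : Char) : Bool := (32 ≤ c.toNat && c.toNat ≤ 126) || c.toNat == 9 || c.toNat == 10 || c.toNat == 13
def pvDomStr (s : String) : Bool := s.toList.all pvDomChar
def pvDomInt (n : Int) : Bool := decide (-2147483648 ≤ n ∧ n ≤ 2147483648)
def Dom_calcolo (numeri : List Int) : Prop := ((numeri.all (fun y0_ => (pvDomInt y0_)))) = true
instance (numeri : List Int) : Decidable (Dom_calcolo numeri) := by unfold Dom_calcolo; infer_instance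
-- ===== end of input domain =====

-- B replaces A's double loop over all index pairs by sort + a two-pointer sweep counting
-- the pairs with difference >= 4, subtracting the pairs among odd values (the only pairs
-- with an odd product).

-- ===== PORT A =====
def calcolo (numeri : List Int) : Int :=
  let coppie : List (Int × Int) :=
    (PySem.List.pyRange 0 (numeri.length : Int) 1).foldl (fun acc i =>
      (PySem.List.pyRange (i + 1) (numeri.length : Int) 1).foldl (fun acc2 j =>
        let num := PySem.List.pyGetD numeri i 0
        let num2 := PySem.List.pyGetD numeri j 0
        if num = num2 then acc2
        else if PySem.Int.mod (num * num2) 2 ≠ 0 then acc2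
        else
          let maggiore := max num num2
          let minore := min num num2
          if maggiore - minore < 4 then acc2
          else acc2 ++ [(maggiore, minore)]) acc) []
  (coppie.length : Int)

-- ===== PORT B =====
-- the inner "while i < len(s) and s[i] <= v - 4: i += 1" loop of Source B
def pvWhileB (s : List Int) (v : Int) (i : Nat) : Nat :=
  if h : i < s.length then
    if s[i] ≤ v - 4 then pvWhileB s v (i + 1) else i
  else i
termination_by s.length - i

-- Source B's coppie_dist4: two-pointer count of pairs with difference >= 4 in a sorted list
def coppieDist4 (s : List Int) : Nat :=
  (s.foldl (fun (st : Nat × Nat) v =>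
      let i := pvWhileB s v st.2
      (st.1 + i, i)) (0, 0)).1

def calcolo_alt (numeri : List Int) : Int :=
  let s := PySem.List.sorted numeri (fun x => x) false
  let dispari := s.filter (fun v => !(PySem.Int.mod v 2 == 0))
  (coppieDist4 s : Int) - (coppieDist4 dispari : Int)

-- ===== PRECONDITION & SPEC =====
def Spec_calcolo (numeri : List Int) (out : Int) : Prop := out = calcolo_alt numeri
instance (numeri : List Int) (out : Int) : Decidable (Spec_calcolo numeri out) := by unfold Spec_calcolo; infer_instance

-- ===== CLAIM (what is proved, stated in full; the proofs are below) =====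
def Claim_equal_calcolo : Prop := ∀ (numeri : List Int), Dom_calcolo numeri → Spec_calcolo numeri (calcolo numeri)

-- ===== LEMMAS AND PROOFS =====

-- pair predicates (proof-side only)
def oddB (a : Int) : Bool := !(PySem.Int.mod a 2 == 0)
def pA (a b : Int) : Bool := decide (¬ a = b) && decide (PySem.Int.mod (a * b) 2 = 0) && decide (4 ≤ max a b - min a b)
def dist4 (a b : Int) : Bool := decide (4 ≤ max a b - min a b)
def o4 (a b : Int) : Bool := oddB a && oddB b && dist4 a b
def le4 (a b : Int) : Bool := decide (a ≤ b - 4)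

-- count of index pairs i < j with P l[i] l[j]
def pc (P : Int → Int → Bool) : List Int → Nat
  | [] => 0
  | a :: t => t.countP (P a) + pc P t

lemma dist4_symm (a b : Int) : dist4 a b = dist4 b a := by
  unfold dist4; rw [max_comm, min_comm]

lemma pc_perm (P : Int → Int → Bool) (hsym : ∀ a b, P a b = P b a)
    {l l' : List Int} (h : l.Perm l') : pc P l = pc P l' := by
  induction h with
  | nil => rfl
  | cons x h ih => simp only [pc, ih, h.countP_congr (fun a _ => rfl)]
  | swap x y l => simp only [pc, List.countP_cons, hsym y x]; omega
  | trans _ _ ih1 ih2 => exact ih1.trans ih2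

lemma oddB_iff (a : Int) : oddB a = true ↔ ¬ (2 ∣ a) := by
  simp [oddB]

lemma odd_mul (a b : Int) :
    PySem.Int.mod (a * b) 2 = 0 ↔ ¬(oddB a = true ∧ oddB b = true) := by
  rw [PySem.Int.mod_eq_zero_iff_dvd, Int.prime_two.dvd_mul, oddB_iff, oddB_iff]
  tauto

lemma pw_split (a b : Int) :
    ((if dist4 a b = true then 1 else 0 : Nat))
      = (if pA a b = true then 1 else 0) + (if o4 a b = true then 1 else 0) := by
  by_cases hd : (4 : Int) ≤ max a b - min a b
  · have hne : ¬ a = b := by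
      intro h; subst h; simp at hd
    by_cases ho : oddB a = true ∧ oddB b = true
    · have he : ¬ (a * b) % 2 = 0 := by
        have h := odd_mul a b
        rw [PySem.Int.mod_eq_emod_of_pos (by norm_num)] at h
        tauto
      have he1 : (a * b) % 2 = 1 := by have := Int.emod_two_eq (a * b); omega
      simp [pA, dist4, o4, hd, hne, ho.1, ho.2, he1]
    · have he : (a * b) % 2 = 0 := by
        have h := (odd_mul a b).mpr ho
        rwa [PySem.Int.mod_eq_emod_of_pos (by norm_num)] at h
      have hob : (oddB a && oddB b) = false := by
        cases ha' : oddB a <;> cases hb' : oddB b <;> simp_all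
      simp [pA, dist4, o4, hd, hne, he, hob]
  · simp [pA, dist4, o4, hd]

lemma pc_split (l : List Int) : pc dist4 l = pc pA l + pc o4 l := by
  induction l with
  | nil => rfl
  | cons a t ih =>
    have hc : ∀ u : List Int, u.countP (dist4 a) = u.countP (pA a) + u.countP (o4 a) := by
      intro u
      induction u with
      | nil => rfl
      | cons b u' ihu => simp only [List.countP_cons, ihu]; have := pw_split a b; omega
    simp only [pc, ih, hc]; omega

lemma pc_filter (q : Int → Bool) (R : Int → Int → Bool) (l : List Int) :
    pc (fun a b => q a && q b && R a b) l = pc R (l.filter q) := by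
  induction l with
  | nil => rfl
  | cons a t ih =>
    rw [List.filter_cons]
    by_cases hq : q a
    · rw [if_pos hq]
      simp only [pc]
      rw [ih, List.countP_filter]
      congr 1
      apply List.countP_congr
      intro x _
      rw [hq]
      cases q x <;> cases R a x <;> simp
    · have hz : t.countP (fun b => q a && q b && R a b) = 0 := by
        apply List.countP_eq_zero.mpr; intro x _; simp [hq]
      rw [if_neg (by simp [hq])]
      simp only [pc]
      rw [ih, hz, Nat.zero_add]

lemma pc_congr_pairwise {P Q : Int → Int → Bool} {l : List Int}
    (h : l.Pairwise (fun a b => P a b = Q a b)) : pc P l = pc Q l := by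
  induction l with
  | nil => rfl
  | cons a t ih =>
    rcases List.pairwise_cons.mp h with ⟨h1, h2⟩
    simp only [pc, ih h2]
    congr 1
    exact List.countP_congr (fun x hx => by rw [h1 x hx])

lemma pc_dist4_le4 {s : List Int} (hs : s.Pairwise (· ≤ ·)) : pc dist4 s = pc le4 s := by
  apply pc_congr_pairwise
  apply hs.imp
  intro a b hab
  simp only [dist4, le4, max_eq_right hab, min_eq_left hab]
  exact decide_eq_decide.mpr (by omega)

-- number of elements of s that are ≤ v - 4
def cnt (s : List Int) (v : Int) : Nat := s.countP (fun x => decide (x ≤ v - 4))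

lemma cnt_zero_of_head {a : Int} {t : List Int} (h1 : ∀ b ∈ t, a ≤ b) {v : Int}
    (ha : ¬ a ≤ v - 4) : cnt t v = 0 :=
  List.countP_eq_zero.mpr (fun x hx => by have := h1 x hx; simp; omega)

lemma cnt_char {s : List Int} (hs : s.Pairwise (· ≤ ·)) (v : Int) :
    ∀ i (h : i < s.length), (s[i] ≤ v - 4 ↔ i < cnt s v) := by
  induction s with
  | nil => intro i h; simp at h
  | cons a t ih =>
    rcases List.pairwise_cons.mp hs with ⟨h1, h2⟩
    intro i h
    have hcnt : cnt (a :: t) v = cnt t v + (if a ≤ v - 4 then 1 else 0) := by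
      simp [cnt, List.countP_cons]
    match i with
    | 0 =>
      simp only [List.getElem_cons_zero, hcnt]
      by_cases ha : a ≤ v - 4
      · simp [ha]
      · simp [ha, cnt_zero_of_head h1 ha]
    | Nat.succ i =>
      have hi' : i < t.length := by simpa using h
      have hit := ih h2 i hi'
      simp only [List.getElem_cons_succ, hcnt]
      by_cases ha : a ≤ v - 4
      · rw [if_pos ha]; omega
      · have ht : ¬ t[i] ≤ v - 4 := by
          have := h1 (t[i]'hi') (List.getElem_mem hi')
          omega
        rw [cnt_zero_of_head h1 ha, if_neg ha]
        omega

lemma cnt_le_length (s : List Int) (v : Int) : cnt s v ≤ s.length :=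
  List.countP_le_length

lemma pvWhileB_eq_cnt {s : List Int} (hs : s.Pairwise (· ≤ ·)) (v : Int) :
    ∀ k i, i ≤ cnt s v → cnt s v - i = k → pvWhileB s v i = cnt s v := by
  intro k
  induction k with
  | zero =>
    intro i hi h0
    have hie : i = cnt s v := by omega
    subst hie
    rw [pvWhileB]
    split
    · rename_i hlen
      rw [if_neg (by have := cnt_char hs v _ hlen; omega)]
    · rfl
  | succ k ihk =>
    intro i hi hk
    have hlt : i < cnt s v := by omega
    have hlen : i < s.length := lt_of_lt_of_le hlt (cnt_le_length s v)
    have hle : s[i] ≤ v - 4 := (cnt_char hs v i hlen).mpr hlt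
    rw [pvWhileB, dif_pos hlen, if_pos hle]
    exact ihk (i + 1) (by omega) (by omega)

lemma cnt_mono (s : List Int) {v w : Int} (h : v ≤ w) : cnt s v ≤ cnt s w := by
  apply List.countP_mono_left
  intro x _
  simp only [decide_eq_true_eq]
  omega

lemma fold_two_pointer {s : List Int} (hs : s.Pairwise (· ≤ ·)) :
    ∀ (t : List Int), t.Pairwise (· ≤ ·) → ∀ (acc i : Nat), (∀ w ∈ t, i ≤ cnt s w) →
      (t.foldl (fun (st : Nat × Nat) v =>
        let i := pvWhileB s v st.2
        (st.1 + i, i)) (acc, i)).1 = acc + (t.map (cnt s)).sum := by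
  intro t
  induction t with
  | nil => intro _ acc i _; simp
  | cons v t ih =>
    intro hp acc i hall
    rcases List.pairwise_cons.mp hp with ⟨h1, h2⟩
    have hv : pvWhileB s v i = cnt s v :=
      pvWhileB_eq_cnt hs v _ i (hall v List.mem_cons_self) rfl
    simp only [List.foldl_cons, List.map_cons, List.sum_cons, hv]
    rw [ih h2 (acc + cnt s v) (cnt s v)
      (fun w hw => (cnt_mono s (h1 w hw)))]
    omega

lemma sum_cnt_eq_pc {s : List Int} (hs : s.Pairwise (· ≤ ·)) :
    (s.map (cnt s)).sum = pc le4 s := by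
  induction s with
  | nil => rfl
  | cons a t ih =>
    rcases List.pairwise_cons.mp hs with ⟨h1, h2⟩
    have hself : cnt (a :: t) a = 0 := by
      apply List.countP_eq_zero.mpr
      intro x hx
      rcases List.mem_cons.mp hx with h | h
      · subst h; simp only [decide_eq_true_eq]; omega
      · have := h1 x h; simp only [decide_eq_true_eq]; omega
    have hstep : ∀ v, cnt (a :: t) v = (if le4 a v then 1 else 0) + cnt t v := by
      intro v; simp only [cnt, List.countP_cons, le4, decide_eq_true_eq]; omega
    calc ((a :: t).map (cnt (a :: t))).sum
        = cnt (a :: t) a + (t.map (cnt (a :: t))).sum := by simp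
      _ = (t.map (fun v => (if le4 a v then 1 else 0) + cnt t v)).sum := by
          rw [hself, Nat.zero_add]
          exact congrArg List.sum (List.map_congr_left (fun v _ => hstep v))
      _ = t.countP (le4 a) + (t.map (cnt t)).sum := by
          rw [List.sum_map_add, PySem.List.sum_map_ite_one_zero_nat]
      _ = pc le4 (a :: t) := by rw [ih h2]; rfl

lemma coppieDist4_eq_pc {s : List Int} (hs : s.Pairwise (· ≤ ·)) :
    coppieDist4 s = pc dist4 s := by
  unfold coppieDist4
  rw [fold_two_pointer hs s hs 0 0 (fun w _ => Nat.zero_le _), sum_cnt_eq_pc hs,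
    pc_dist4_le4 hs]
  exact Nat.zero_add _

lemma sum_range_pc (P : Int → Int → Bool) (l : List Int) :
    ((List.range l.length).map (fun k => (l.drop (k + 1)).countP (P (l.getD k 0)))).sum
      = pc P l := by
  induction l with
  | nil => rfl
  | cons a t ih =>
    rw [List.length_cons, List.range_succ_eq_map]
    simp only [List.map_cons, List.map_map, List.sum_cons, Function.comp_def]
    simp only [Nat.succ_eq_add_one, List.drop_succ_cons, List.getD_cons_succ,
      List.getD_cons_zero, List.drop_zero]
    rw [ih]
    rfl

-- the block of pairs contributed by outer index i in A's double loop
def pvBlock (l : List Int) (i : Int) : List (Int × Int) :=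
  ((l.drop (i.toNat + 1)).filter (pA (PySem.List.pyGetD l i 0))).map
    (fun y => (max (PySem.List.pyGetD l i 0) y, min (PySem.List.pyGetD l i 0) y))

lemma inner_eq (l : List Int) (i : Int) (h0 : 0 ≤ i) (acc : List (Int × Int)) :
    (PySem.List.pyRange (i + 1) (l.length : Int) 1).foldl (fun acc2 j =>
        let num := PySem.List.pyGetD l i 0
        let num2 := PySem.List.pyGetD l j 0
        if num = num2 then acc2
        else if PySem.Int.mod (num * num2) 2 ≠ 0 then acc2
        else
          let maggiore := max num num2
          let minore := min num num2
          if maggiore - minore < 4 then acc2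
          else acc2 ++ [(maggiore, minore)]) acc
      = acc ++ pvBlock l i := by
  have h1 : (0 : Int) ≤ i + 1 := by omega
  have hT : (i + 1).toNat = i.toNat + 1 := by omega
  rw [PySem.List.foldl_pyRange_pyGetD' l 0
    (fun acc2 num2 =>
      let num := PySem.List.pyGetD l i 0
      if num = num2 then acc2
      else if PySem.Int.mod (num * num2) 2 ≠ 0 then acc2
      else
        let maggiore := max num num2
        let minore := min num num2
        if maggiore - minore < 4 then acc2
        else acc2 ++ [(maggiore, minore)]) acc h1]
  have hbody : (fun acc2 num2 =>
      let num := PySem.List.pyGetD l i 0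
      if num = num2 then acc2
      else if PySem.Int.mod (num * num2) 2 ≠ 0 then acc2
      else
        let maggiore := max num num2
        let minore := min num num2
        if maggiore - minore < 4 then acc2
        else acc2 ++ [(maggiore, minore)])
      = (fun (acc2 : List (Int × Int)) y =>
          if pA (PySem.List.pyGetD l i 0) y = true then
            acc2 ++ [(max (PySem.List.pyGetD l i 0) y, min (PySem.List.pyGetD l i 0) y)]
          else acc2) := by
    funext acc2 y
    show (if PySem.List.pyGetD l i 0 = y then acc2
      else if PySem.Int.mod (PySem.List.pyGetD l i 0 * y) 2 ≠ 0 then acc2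
      else if max (PySem.List.pyGetD l i 0) y - min (PySem.List.pyGetD l i 0) y < 4 then acc2
      else acc2 ++ [(max (PySem.List.pyGetD l i 0) y, min (PySem.List.pyGetD l i 0) y)]) = _
    set num := PySem.List.pyGetD l i 0 with hnum
    rw [show PySem.Int.mod (num * y) 2 = (num * y) % 2 from
      PySem.Int.mod_eq_emod_of_pos (by norm_num)]
    by_cases hEq : num = y
    · simp [pA, hEq]
    · by_cases hm : (num * y) % 2 = 0
      · have hdvd : 2 ∣ num * y := Int.dvd_of_emod_eq_zero hm
        by_cases hlt : max num y - min num y < 4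
        · have hle : ¬ 4 ≤ max num y - min num y := by omega
          simp [pA, hEq, hm, hlt, hle]
        · have hle : 4 ≤ max num y - min num y := by omega
          simp [pA, hEq, hm, hlt, hle]
      · have hdvd : ¬ 2 ∣ num * y := fun h => hm (Int.emod_eq_zero_of_dvd h)
        have hone : (num * y) % 2 = 1 := by have := Int.emod_two_eq (num * y); omega
        simp [pA, hEq, hone]
  rw [hbody, PySem.List.foldl_append_if, hT]
  rfl

lemma calcolo_eq_pc (l : List Int) : calcolo l = (pc pA l : Int) := by
  have hcong : ∀ (acc : List (Int × Int)), ∀ i ∈ PySem.List.pyRange 0 (l.length : Int) 1,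
      (PySem.List.pyRange (i + 1) (l.length : Int) 1).foldl (fun acc2 j =>
        let num := PySem.List.pyGetD l i 0
        let num2 := PySem.List.pyGetD l j 0
        if num = num2 then acc2
        else if PySem.Int.mod (num * num2) 2 ≠ 0 then acc2
        else
          let maggiore := max num num2
          let minore := min num num2
          if maggiore - minore < 4 then acc2
          else acc2 ++ [(maggiore, minore)]) acc
      = acc ++ pvBlock l i := by
    intro acc i hi
    have h0 : 0 ≤ i := (PySem.List.mem_pyRange_one.mp hi).1
    exact inner_eq l i h0 acc
  unfold calcolo
  rw [PySem.List.foldl_congr_mem _ _ (fun acc i => acc ++ pvBlock l i) _ hcong,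
    PySem.List.foldl_append_eq_flatMap, List.nil_append]
  rw [PySem.List.pyRange_zero_nat l.length]
  show ((List.flatMap (pvBlock l) ((List.range l.length).map (fun (k : Nat) => (k : Int)))).length : Int)
      = (pc pA l : Int)
  rw [List.flatMap_map, List.length_flatMap, ← sum_range_pc pA l]
  congr 1
  apply congrArg List.sum
  apply List.map_congr_left
  intro k _
  show (pvBlock l ((k : Nat) : Int)).length = (l.drop (k + 1)).countP (pA (l.getD k 0))
  unfold pvBlock
  simp [List.countP_eq_length_filter]

-- ===== VERDICT (by name: the statement is the Claim_ definition above) =====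
theorem calcolo_spec : Claim_equal_calcolo := by
  intro l _
  show calcolo l = calcolo_alt l
  have o4_symm : ∀ a b, o4 a b = o4 b a := by
    intro a b; unfold o4; rw [dist4_symm]; ac_rfl
  set s := PySem.List.sorted l (fun x => x) false with hsdef
  have hperm : s.Perm l := PySem.List.sorted_perm l (fun x => x) false
  have hs : s.Pairwise (· ≤ ·) := PySem.List.sorted_pairwise l (fun x => x)
  have hfs : (s.filter oddB).Pairwise (· ≤ ·) := List.Pairwise.filter _ hs
  rw [calcolo_eq_pc]
  show (pc pA l : Int) = (coppieDist4 s : Int) - (coppieDist4 (s.filter (fun v => !(PySem.Int.mod v 2 == 0))) : Int)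
  have h1 : coppieDist4 s = pc dist4 l :=
    (coppieDist4_eq_pc hs).trans (pc_perm dist4 dist4_symm hperm)
  have h2 : coppieDist4 (s.filter (fun v => !(PySem.Int.mod v 2 == 0))) = pc o4 l := by
    have : coppieDist4 (s.filter oddB) = pc dist4 (s.filter oddB) := coppieDist4_eq_pc hfs
    calc coppieDist4 (s.filter (fun v => !(PySem.Int.mod v 2 == 0)))
        = pc dist4 (s.filter oddB) := this
      _ = pc o4 s := (pc_filter oddB dist4 s).symm
      _ = pc o4 l := pc_perm o4 o4_symm hperm
  rw [h1, h2]
  have := pc_split l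
  omega
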